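-- pv_equiv track=rewrite | github.com/SVwrite/Practice_Problems | Solved/Eerie_Planet/Eerie_planet.py | dutyChart
-- ===== SOURCE A (Python) =====
-- def dutyChart(Crew, H):
--     Duty ={}
--     for i in range(1,H+1):
--         Duty[i] =[]
--         for c in Crew:
--             if i>= c[1] and i<= c[2]:
--                 Duty[i].append(c[0])
--     return Duty
-- ===== SOURCE B (Python) =====
-- def dutyChart(Crew, H):
--     rows = [[] for _ in range(H)]
--     for name, lo, hi in Crew:
--         for i in range(max(lo, 1), min(hi, H) + 1):
--             rows[i - 1].append(name)
--     return {i + 1: row for i, row in enumerate(rows)}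
-- ===== Notes on version B (the rewrite author's own statement) =====
-- stated objective: faster
-- what changed: A loops over every hour and scans the whole crew per hour; B loops over the crew once and appends each name directly into its clamped range of pre-built hour rows, then emits the rows.
import Mathlib
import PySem

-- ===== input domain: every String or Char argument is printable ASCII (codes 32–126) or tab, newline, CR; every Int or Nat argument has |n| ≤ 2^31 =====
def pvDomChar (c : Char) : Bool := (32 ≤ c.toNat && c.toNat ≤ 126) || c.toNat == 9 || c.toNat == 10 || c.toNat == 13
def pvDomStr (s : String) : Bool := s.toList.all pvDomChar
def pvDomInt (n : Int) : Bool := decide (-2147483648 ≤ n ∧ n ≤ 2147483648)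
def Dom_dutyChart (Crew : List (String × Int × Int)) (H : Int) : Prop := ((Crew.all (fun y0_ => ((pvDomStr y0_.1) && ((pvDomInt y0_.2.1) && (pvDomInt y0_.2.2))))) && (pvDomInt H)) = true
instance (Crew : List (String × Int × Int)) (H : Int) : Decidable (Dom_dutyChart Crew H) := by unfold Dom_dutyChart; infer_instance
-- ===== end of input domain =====

-- B replaces A's hour-by-hour scan of the whole crew with a single pass over the crew
-- that appends each name into its clamped range of pre-built hour rows (measured faster).


-- ===== PORT A =====
-- for i in range(1, H+1): Duty[i] = []; for c in Crew: if i >= c[1] and i <= c[2]: Duty[i].append(c[0])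
def dutyChart (Crew : List (String × Int × Int)) (H : Int) : List (Int × List String) :=
  ((PySem.List.pyRange 1 (H + 1) 1).foldl (fun d i =>
      let d := PySem.Dict.insert d i ([] : List String)
      Crew.foldl (fun d c =>
        if i ≥ c.2.1 && i ≤ c.2.2 then PySem.Dict.modify d i [] (fun l => l ++ [c.1]) else d) d)
    PySem.Dict.empty).items

-- ===== PORT B =====
-- rows[i-1].append(name): update the (i-1)-th row in place (i is always in range in B's loop)
def updAt : List (List String) → Nat → String → List (List String)
  | [], _, _ => []
  | r :: rs, 0, n => (r ++ [n]) :: rs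
  | r :: rs, k + 1, n => r :: updAt rs k n

-- rows = [[] for _ in range(H)]; for name, lo, hi in Crew: for i in range(max(lo,1), min(hi,H)+1): rows[i-1].append(name); return {i+1: row for i, row in enumerate(rows)}
def dutyChart_alt (Crew : List (String × Int × Int)) (H : Int) : List (Int × List String) :=
  let rows0 : List (List String) := List.replicate H.toNat []
  let rows := Crew.foldl (fun rows c =>
    (PySem.List.pyRange (max c.2.1 1) (min c.2.2 H + 1) 1).foldl
      (fun rows i => updAt rows (i - 1).toNat c.1) rows) rows0
  (PySem.List.enumerate rows 0).map (fun p => (p.1 + 1, p.2))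

-- ===== PRECONDITION & SPEC =====
def Spec_dutyChart (Crew : List (String × Int × Int)) (H : Int) (out : List (Int × List String)) : Prop := out = dutyChart_alt Crew H
instance (Crew : List (String × Int × Int)) (H : Int) (out : List (Int × List String)) : Decidable (Spec_dutyChart Crew H out) := by unfold Spec_dutyChart; infer_instance

-- ===== CLAIM (what is proved, stated in full; the proofs are below) =====
def Claim_equal_dutyChart : Prop := ∀ (Crew : List (String × Int × Int)) (H : Int), Dom_dutyChart Crew H → Spec_dutyChart Crew H (dutyChart Crew H)

-- ===== LEMMAS AND PROOFS =====

-- the common target: hour i's duty list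
def pvRow (Crew : List (String × Int × Int)) (i : Int) : List String :=
  (Crew.filter (fun c => c.2.1 ≤ i && i ≤ c.2.2)).map (·.1)

lemma modify_append_fresh (prev : List (Int × List String)) (i : Int) (v : List String)
    (f : List String → List String) (h : ∀ p ∈ prev, p.1 ≠ i) :
    PySem.Dict.modify (PySem.Dict.mk (prev ++ [(i, v)])) i [] f
      = PySem.Dict.mk (prev ++ [(i, f v)]) := by
  have hg : (PySem.Dict.mk (prev ++ [(i, v)])).getD i [] = v := by
    induction prev with
    | nil => simp [PySem.Dict.getD, PySem.Dict.get?]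
    | cons p t ih =>
      have : p.1 ≠ i := h p (by simp)
      simp_all [PySem.Dict.getD, PySem.Dict.get?]
  have hmap : ∀ (l : List (Int × List String)), (∀ p ∈ l, p.1 ≠ i) →
      l.map (fun p => if p.1 == i then (i, f v) else p) = l := by
    intro l hl
    induction l with
    | nil => simp
    | cons p t ih =>
      have : p.1 ≠ i := hl p (by simp)
      simp_all
  have hc : (PySem.Dict.mk (prev ++ [(i, v)])).contains i = true := by
    simp [PySem.Dict.contains]
  simp only [PySem.Dict.modify, hg, PySem.Dict.insert, hc, if_pos]
  congr 1
  simp only [List.map_append, hmap prev h]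
  simp

lemma innerA_items (Crew : List (String × Int × Int)) (i : Int)
    (prev : List (Int × List String)) (h : ∀ p ∈ prev, p.1 ≠ i) :
    ∀ (v : List String),
    Crew.foldl (fun d c =>
        if i ≥ c.2.1 && i ≤ c.2.2 then PySem.Dict.modify d i [] (fun l => l ++ [c.1]) else d)
      (PySem.Dict.mk (prev ++ [(i, v)]))
      = PySem.Dict.mk (prev ++ [(i, v ++ pvRow Crew i)]) := by
  induction Crew with
  | nil => intro v; simp [pvRow]
  | cons c t ih =>
    intro v
    by_cases hc : c.2.1 ≤ i ∧ i ≤ c.2.2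
    · simp only [List.foldl_cons, pvRow, List.filter_cons]
      rw [if_pos (by simp [hc.1, hc.2, ge_iff_le]), modify_append_fresh prev i v _ h]
      rw [ih (v ++ [c.1])]
      simp [pvRow, hc.1, hc.2]
    · simp only [List.foldl_cons, pvRow, List.filter_cons]
      rw [if_neg (by simpa [ge_iff_le, Decidable.not_and_iff_or_not] using hc)]
      rw [ih v]
      have : (decide (c.2.1 ≤ i) && decide (i ≤ c.2.2)) = false := by
        rcases Decidable.not_and_iff_or_not.mp hc with h1 | h1 <;> simp [h1]
      simp [pvRow, this]

lemma outerA_items (Crew : List (String × Int × Int)) :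
    ∀ (n : Nat) (a : Int) (prev : List (Int × List String)), (∀ p ∈ prev, p.1 < a) →
    ((PySem.List.pyRange a (a + n) 1).foldl (fun d i =>
        let d := PySem.Dict.insert d i ([] : List String)
        Crew.foldl (fun d c =>
          if i ≥ c.2.1 && i ≤ c.2.2 then PySem.Dict.modify d i [] (fun l => l ++ [c.1]) else d) d)
      (PySem.Dict.mk prev)).items
      = prev ++ (PySem.List.pyRange a (a + n) 1).map (fun i => (i, pvRow Crew i)) := by
  intro n
  induction n with
  | zero => intro a prev h; simp
  | succ m ih =>
    intro a prev h
    rw [PySem.List.pyRange_one_cons (by omega : a < a + (m+1 : Nat))]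
    simp only [List.foldl_cons, List.map_cons]
    have hfresh : (PySem.Dict.mk prev).contains a = false := by
      simp only [PySem.Dict.contains, List.any_eq_false]
      intro p hp
      simp [ne_of_lt (h p hp)]
    have hins : PySem.Dict.insert (PySem.Dict.mk prev) a ([] : List String)
        = PySem.Dict.mk (prev ++ [(a, [])]) := by
      simp [PySem.Dict.insert, hfresh]
    rw [hins, innerA_items Crew a prev (fun p hp => ne_of_lt (h p hp)) []]
    have h2 : ∀ p ∈ prev ++ [(a, pvRow Crew a)], p.1 < a + 1 := by
      intro p hp
      rcases List.mem_append.mp hp with hp | hp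
      · have := h p hp; omega
      · simp at hp; simp [hp]
    have := ih (a + 1) (prev ++ [(a, pvRow Crew a)]) h2
    rw [show a + 1 + (m : Int) = a + ((m + 1 : Nat) : Int) by push_cast; ring] at this
    simpa using this

lemma dutyChart_eq_map (Crew : List (String × Int × Int)) (H : Int) :
    dutyChart Crew H = (PySem.List.pyRange 1 (H + 1) 1).map (fun i => (i, pvRow Crew i)) := by
  unfold dutyChart
  by_cases hpos : 0 ≤ H
  · have := outerA_items Crew H.toNat 1 [] (by simp)
    rw [show (1 : Int) + (H.toNat : Int) = H + 1 by omega] at this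
    simpa [PySem.Dict.empty] using this
  · rw [PySem.List.pyRange_one_eq_nil (by omega)]
    simp [PySem.Dict.empty]

lemma updAt_getElem? (rows : List (List String)) (m : Nat) (n : String) (j : Nat) :
    (updAt rows m n)[j]? = if j = m then rows[j]?.map (· ++ [n]) else rows[j]? := by
  induction rows generalizing m j with
  | nil => simp [updAt]
  | cons r rs ih =>
    cases m with
    | zero => cases j <;> simp [updAt]
    | succ m' =>
      cases j with
      | zero => simp [updAt]
      | succ j' => simpa [updAt] using ih m' j'

lemma innerB_getElem? (hi : Int) (n : String) (k : Nat) :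
    ∀ (t : Nat) (lo : Int), 1 ≤ lo → hi - lo ≤ t → ∀ (rows : List (List String)),
    ((PySem.List.pyRange lo hi 1).foldl (fun rows i => updAt rows (i - 1).toNat n) rows)[k]?
      = rows[k]?.map (fun r => if lo ≤ (k : Int) + 1 ∧ (k : Int) + 1 < hi then r ++ [n] else r) := by
  intro t
  induction t with
  | zero =>
    intro lo h1 ht rows
    rw [PySem.List.pyRange_one_eq_nil (by omega)]
    have : ¬(lo ≤ (k : Int) + 1 ∧ (k : Int) + 1 < hi) := by omega
    cases h : rows[k]? <;> simp [this, h]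
  | succ m ih =>
    intro lo h1 ht rows
    by_cases hr : lo < hi
    · rw [PySem.List.pyRange_one_cons hr]
      simp only [List.foldl_cons]
      rw [ih (lo + 1) (by omega) (by omega)]
      rw [updAt_getElem?]
      by_cases hk : k = (lo - 1).toNat
      · rw [if_pos hk]
        have c2 : lo ≤ (k : Int) + 1 ∧ (k : Int) + 1 < hi := by omega
        cases h : rows[k]? <;> simp [c2, h] <;> omega
      · rw [if_neg hk]
        have heq : (lo + 1 ≤ (k : Int) + 1 ∧ (k : Int) + 1 < hi) ↔ (lo ≤ (k : Int) + 1 ∧ (k : Int) + 1 < hi) := by omega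
        simp only [heq]
    · rw [PySem.List.pyRange_one_eq_nil (by omega)]
      have : ¬(lo ≤ (k : Int) + 1 ∧ (k : Int) + 1 < hi) := by omega
      cases h : rows[k]? <;> simp [this, h]

lemma crewB_getElem? (H : Int) (k : Nat) :
    ∀ (Crew : List (String × Int × Int)) (rows : List (List String)),
    (Crew.foldl (fun rows c =>
        (PySem.List.pyRange (max c.2.1 1) (min c.2.2 H + 1) 1).foldl
          (fun rows i => updAt rows (i - 1).toNat c.1) rows) rows)[k]?
      = rows[k]?.map (fun r =>
          r ++ (Crew.filter (fun c => max c.2.1 1 ≤ (k : Int) + 1 && (k : Int) + 1 ≤ min c.2.2 H)).map (·.1)) := by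
  intro Crew
  induction Crew with
  | nil => intro rows; cases h : rows[k]? <;> simp [h]
  | cons c t ih =>
    intro rows
    simp only [List.foldl_cons]
    rw [ih]
    rw [innerB_getElem? (min c.2.2 H + 1) c.1 k ((min c.2.2 H + 1) - (max c.2.1 1)).toNat (max c.2.1 1)
      (by omega) (by omega) rows]
    by_cases hc : max c.2.1 1 ≤ (k : Int) + 1 ∧ (k : Int) + 1 ≤ min c.2.2 H
    · have hc' : max c.2.1 1 ≤ (k : Int) + 1 ∧ (k : Int) + 1 < min c.2.2 H + 1 := by omega
      have q1 : c.2.1 ≤ (k : Int) + 1 := by omega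
      have q2 : (k : Int) < c.2.2 := by omega
      have q3 : (k : Int) < H := by omega
      cases h : rows[k]? <;> simp [hc', q1, q2, q3]
    · have hc' : ¬(max c.2.1 1 ≤ (k : Int) + 1 ∧ (k : Int) + 1 < min c.2.2 H + 1) := by omega
      have hq : ¬(c.2.1 ≤ (k : Int) + 1 ∧ (k : Int) < c.2.2 ∧ (k : Int) < H) := by omega
      cases h : rows[k]? <;> simp [hq]

lemma dutyChart_alt_eq_map (Crew : List (String × Int × Int)) (H : Int) :
    dutyChart_alt Crew H = (PySem.List.pyRange 1 (H + 1) 1).map (fun i => (i, pvRow Crew i)) := by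
  unfold dutyChart_alt
  apply List.ext_getElem?
  intro k
  rw [List.getElem?_map, PySem.List.getElem?_enumerate, crewB_getElem?, List.getElem?_map]
  by_cases hk : k < H.toNat
  · rw [List.getElem?_replicate, if_pos hk]
    rw [PySem.List.getElem?_pyRange_one, if_pos (show k < (H + 1 - 1).toNat by omega)]
    have hrow : (Crew.filter (fun c => max c.2.1 1 ≤ (k : Int) + 1 && (k : Int) + 1 ≤ min c.2.2 H))
        = (Crew.filter (fun c => c.2.1 ≤ (k : Int) + 1 && (k : Int) + 1 ≤ c.2.2)) := by
      apply List.filter_congr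
      intro c _
      apply Bool.eq_iff_iff.mpr
      constructor <;> intro hb <;> simp at hb ⊢ <;> omega
    have h1k : (1 : Int) + (k : Int) = (k : Int) + 1 := by ring
    simp only [Option.map_some, Option.some.injEq, Prod.mk.injEq, List.nil_append, hrow, pvRow, h1k]
    exact ⟨by omega, trivial⟩
  · rw [List.getElem?_replicate, if_neg hk]
    rw [PySem.List.getElem?_pyRange_one, if_neg (show ¬ k < (H + 1 - 1).toNat by omega)]
    rfl

-- ===== VERDICT (by name: the statement is the Claim_ definition above) =====
theorem dutyChart_spec : Claim_equal_dutyChart := by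
  intro Crew H _
  unfold Spec_dutyChart
  rw [dutyChart_eq_map, dutyChart_alt_eq_map]
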